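-- pv_equiv track=rewrite | github.com/phammanhhiep/cs244n_nlp | projects/parsing/cfg/cnf.py | _is_mixed
-- ===== SOURCE A (Python) =====
-- def _is_mixed (ri, L):
-- 	is_mixed = False
-- 	ri_split = ri.split (' ')
-- 	for k,v in L.items ():
-- 		for t in v:
-- 			for rij in ri_split:
-- 				if t == rij:
-- 					is_mixed = True
-- 					return is_mixed
-- 	return is_mixed
-- ===== SOURCE B (Python) =====
-- def _is_mixed(ri, L):
--     toks = sorted(set(ri.split(' ')))
--     terms = sorted({t for v in L.values() for t in v})
--     i = j = 0
--     while i < len(toks) and j < len(terms):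
--         if toks[i] == terms[j]:
--             return True
--         if toks[i] < terms[j]:
--             i += 1
--         else:
--             j += 1
--     return False
-- ===== Notes on version B (the rewrite author's own statement) =====
-- stated objective: alternative
-- what changed: Replaces A's triple-nested early-return scan with a sort-then-merge algorithm: both the token set and the flattened terminal set are deduplicated, sorted, and walked with two pointers looking for a common element.
import Mathlib
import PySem

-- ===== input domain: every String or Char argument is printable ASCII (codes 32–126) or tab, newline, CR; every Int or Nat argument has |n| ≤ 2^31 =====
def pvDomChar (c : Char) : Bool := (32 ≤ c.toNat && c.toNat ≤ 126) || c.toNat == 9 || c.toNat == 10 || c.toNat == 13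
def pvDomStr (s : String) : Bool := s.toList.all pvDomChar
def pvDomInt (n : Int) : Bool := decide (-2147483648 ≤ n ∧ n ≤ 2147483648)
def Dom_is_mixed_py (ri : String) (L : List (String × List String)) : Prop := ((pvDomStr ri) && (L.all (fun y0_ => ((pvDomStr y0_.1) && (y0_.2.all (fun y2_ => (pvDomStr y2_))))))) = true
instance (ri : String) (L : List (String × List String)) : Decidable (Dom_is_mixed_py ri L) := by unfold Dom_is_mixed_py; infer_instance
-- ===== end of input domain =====

-- B replaces A's triple-nested early-return scan with sort-both-dedup-lists + two-pointer merge (objective: alternative).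


-- ===== PORT A =====
-- innermost loop: 'for rij in ri_split: if t == rij: return True'
def pvA_loopR (t : String) : List String → Bool
  | [] => false
  | rij :: rest => if t == rij then true else pvA_loopR t rest

-- middle loop: 'for t in v' (a 'return True' from the inner loop propagates)
def pvA_loopT (riSplit : List String) : List String → Bool
  | [] => false
  | t :: ts => if pvA_loopR t riSplit then true else pvA_loopT riSplit ts

-- outer loop: 'for k, v in L.items()'
def pvA_loopKV (riSplit : List String) : List (String × List String) → Bool
  | [] => false
  | kv :: rest => if pvA_loopT riSplit kv.2 then true else pvA_loopKV riSplit rest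

def is_mixed_py (ri : String) (L : List (String × List String)) : Bool :=
  -- ri.split(' '): sep " " is nonempty, so PySem.Str.split? is always 'some'
  let ri_split := (PySem.Str.split? ri " ").getD []
  pvA_loopKV ri_split L
  -- falls through to 'return is_mixed' (still False) when no match

-- ===== PORT B =====
-- the while-loop with the two pointers i, j, transcribed as recursion on the two suffixes
def pvB_merge : List String → List String → Bool
  | [], _ => false
  | _ :: _, [] => false
  | x :: xs, y :: ys =>
    if x == y then true
    else if x < y then pvB_merge xs (y :: ys)
    else pvB_merge (x :: xs) ys

def is_mixed_py_alt (ri : String) (L : List (String × List String)) : Bool :=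
  -- sorted(set(...)): dedup then sort; identity key, so the Set's iteration order does not matter
  let toks := PySem.List.sorted (PySem.Set.ofList ((PySem.Str.split? ri " ").getD [])) (fun x => x) false
  let terms := PySem.List.sorted (PySem.Set.ofList (L.flatMap (fun kv => kv.2))) (fun x => x) false
  pvB_merge toks terms

-- ===== PRECONDITION & SPEC =====
def Spec_is_mixed_py (ri : String) (L : List (String × List String)) (out : Bool) : Prop := out = is_mixed_py_alt ri L
instance (ri : String) (L : List (String × List String)) (out : Bool) : Decidable (Spec_is_mixed_py ri L out) := by unfold Spec_is_mixed_py; infer_instance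

-- ===== CLAIM (what is proved, stated in full; the proofs are below) =====
def Claim_equal_is_mixed_py : Prop := ∀ (ri : String) (L : List (String × List String)), Dom_is_mixed_py ri L → Spec_is_mixed_py ri L (is_mixed_py ri L)

-- ===== LEMMAS AND PROOFS =====
theorem pvA_loopR_eq (t : String) (rs : List String) : pvA_loopR t rs = decide (t ∈ rs) := by
  induction rs with
  | nil => simp [pvA_loopR]
  | cons r rs ih =>
    simp only [pvA_loopR, ih]
    by_cases h : t = r <;> simp [h]

theorem pvA_loopT_eq (rs ts : List String) : pvA_loopT rs ts = ts.any (fun t => decide (t ∈ rs)) := by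
  induction ts with
  | nil => simp [pvA_loopT]
  | cons t ts ih =>
    simp only [pvA_loopT, pvA_loopR_eq, ih, List.any_cons]
    by_cases h : t ∈ rs <;> simp [h]

theorem pvA_loopKV_eq (rs : List String) (L : List (String × List String)) :
    pvA_loopKV rs L = L.any (fun kv => kv.2.any (fun t => decide (t ∈ rs))) := by
  induction L with
  | nil => simp [pvA_loopKV]
  | cons kv L ih =>
    simp only [pvA_loopKV, pvA_loopT_eq, ih, List.any_cons]
    by_cases h : kv.2.any (fun t => decide (t ∈ rs)) <;> simp [h]

-- the merge walk on two strictly increasing lists finds exactly a common element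
theorem pvB_merge_iff : ∀ (xs ys : List String), xs.Pairwise (· < ·) → ys.Pairwise (· < ·) →
    (pvB_merge xs ys = true ↔ ∃ a, a ∈ xs ∧ a ∈ ys) := by
  intro xs
  induction xs with
  | nil => intro ys _ _; simp [pvB_merge]
  | cons x xs ihx =>
    intro ys
    induction ys with
    | nil => intro _ _; simp [pvB_merge]
    | cons y ys ihy =>
      intro hx hy
      rw [List.pairwise_cons] at hx hy
      simp only [pvB_merge]
      by_cases hxy : x = y
      · simp only [hxy, beq_self_eq_true, if_true, true_iff]
        exact ⟨y, by simp, by simp⟩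
      · simp only [beq_iff_eq, hxy, if_false]
        by_cases hlt : x < y
        · rw [if_pos hlt, ihx (y :: ys) hx.2 (List.pairwise_cons.mpr hy)]
          constructor
          · rintro ⟨a, ha, hb⟩; exact ⟨a, List.mem_cons_of_mem _ ha, hb⟩
          · rintro ⟨a, ha, hb⟩
            rcases List.mem_cons.mp ha with rfl | ha
            · rcases List.mem_cons.mp hb with rfl | hb
              · exact absurd rfl hxy
              · exact absurd (lt_trans hlt (hy.1 _ hb)) (lt_irrefl a)
            · exact ⟨a, ha, hb⟩
        · have hyx : y < x := lt_of_le_of_ne (not_lt.mp hlt) (Ne.symm hxy)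
          rw [if_neg hlt, ihy (List.pairwise_cons.mpr hx) hy.2]
          constructor
          · rintro ⟨a, ha, hb⟩; exact ⟨a, ha, List.mem_cons_of_mem _ hb⟩
          · rintro ⟨a, ha, hb⟩
            rcases List.mem_cons.mp hb with rfl | hb
            · rcases List.mem_cons.mp ha with rfl | ha
              · exact absurd rfl hxy
              · exact absurd (lt_trans hyx (hx.1 _ ha)) (lt_irrefl a)
            · exact ⟨a, ha, hb⟩

theorem is_mixed_py_spec : Claim_equal_is_mixed_py := by
  intro ri L _
  unfold Spec_is_mixed_py is_mixed_py is_mixed_py_alt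
  simp only [pvA_loopKV_eq]
  rw [Bool.eq_iff_iff]
  rw [pvB_merge_iff _ _ (PySem.List.sorted_ofList_pairwise_lt _) (PySem.List.sorted_ofList_pairwise_lt _)]
  simp [PySem.List.mem_sorted, PySem.Set.mem_ofList, List.mem_flatMap]
  tauto
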